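-- pv_equiv track=rewrite | github.com/BillionsRichard/pycharmWorkspace | mapReduce/nlp/tf-idf.py | get_all_words_freq
-- ===== SOURCE A (Python) =====
-- def get_all_words_freq(docs_word_freq):
--     """获取语料库中所有单词的词频
--
--     :param docs_word_freq: 各个文档的词频.
--     :return:
--     """
--     all_word_freq = {}
--     for doc in docs_word_freq:
--         doc_word_freq = docs_word_freq.get(doc, {})
--         for word in doc_word_freq:
--             word_freq = all_word_freq.get(word, 0) + doc_word_freq.get(word, 0)
--             all_word_freq[word] = word_freq
--
--     return all_word_freq
-- ===== SOURCE B (Python) =====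
-- def get_all_words_freq(docs_word_freq):
--     """Sum word frequencies across all documents (collect-keys-then-sum decomposition)."""
--     words = {}
--     for doc in docs_word_freq:
--         for word in docs_word_freq.get(doc, {}):
--             words[word] = None
--     return {word: sum(docs_word_freq.get(doc, {}).get(word, 0)
--                       for doc in docs_word_freq)
--             for word in words}
-- ===== Notes on version B (the rewrite author's own statement) =====
-- stated objective: alternative
-- what changed: A accumulates running totals in one interleaved dict-update loop; B first collects every word in first-appearance order, then computes each word's total independently by re-scanning all documents, trading the mutable accumulator for a collect-then-sum-per-word decomposition.
import Mathlib
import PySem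

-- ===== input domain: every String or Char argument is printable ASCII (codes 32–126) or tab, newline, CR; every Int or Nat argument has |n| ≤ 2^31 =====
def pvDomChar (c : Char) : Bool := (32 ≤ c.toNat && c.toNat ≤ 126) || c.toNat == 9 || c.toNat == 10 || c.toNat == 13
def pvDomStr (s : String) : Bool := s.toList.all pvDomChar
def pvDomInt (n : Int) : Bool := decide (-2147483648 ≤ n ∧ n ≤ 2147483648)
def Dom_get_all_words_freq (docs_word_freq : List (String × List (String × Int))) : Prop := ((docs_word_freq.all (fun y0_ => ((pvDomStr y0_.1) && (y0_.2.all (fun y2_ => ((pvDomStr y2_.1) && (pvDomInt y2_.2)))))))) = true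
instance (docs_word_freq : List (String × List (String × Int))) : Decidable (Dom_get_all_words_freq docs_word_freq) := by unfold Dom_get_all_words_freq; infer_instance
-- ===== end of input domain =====

-- B replaces A's single interleaved accumulate with a collect-words-then-sum-per-word decomposition (objective: alternative; return value only, no mutation involved).

-- ===== PORT A =====
-- 'for doc in docs_word_freq' iterates the dict's keys in insertion order; we fold over the
-- association list's pairs and use 'doc.1' as the key, modelling each '.get' with Dict.mk lookups.
def get_all_words_freq (docs_word_freq : List (String × List (String × Int))) : List (String × Int) :=
  (docs_word_freq.foldl
    (fun all_word_freq doc =>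
      let doc_word_freq := (PySem.Dict.mk docs_word_freq).getD doc.1 []
      doc_word_freq.foldl
        (fun all_word_freq w =>
          let word_freq := all_word_freq.getD w.1 0 + (PySem.Dict.mk doc_word_freq).getD w.1 0
          all_word_freq.insert w.1 word_freq)
        all_word_freq)
    PySem.Dict.empty).items

-- ===== PORT B =====
-- 'words[word] = None' is an order-preserving key collector: ported as a PySem.Set of the words.
def get_all_words_freq_alt (docs_word_freq : List (String × List (String × Int))) : List (String × Int) :=
  let words : List String :=
    docs_word_freq.foldl
      (fun ws doc =>
        ((PySem.Dict.mk docs_word_freq).getD doc.1 []).foldl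
          (fun ws w => PySem.Set.add ws w.1) ws)
      []
  words.map (fun word =>
    (word,
      docs_word_freq.foldl
        (fun acc doc =>
          acc + (PySem.Dict.mk ((PySem.Dict.mk docs_word_freq).getD doc.1 [])).getD word 0)
        0))

-- ===== PRECONDITION & SPEC =====
-- Pre_ excludes association lists with duplicate keys (at either level): A's parameter is a
-- Python dict, which cannot hold duplicate keys, so behaviour on such lists is an accident of
-- the assoc-list encoding, not of A.
def Pre_get_all_words_freq (docs_word_freq : List (String × List (String × Int))) : Prop :=
  (docs_word_freq.map Prod.fst).Nodup ∧ ∀ p ∈ docs_word_freq, (p.2.map Prod.fst).Nodup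
instance (docs_word_freq : List (String × List (String × Int))) : Decidable (Pre_get_all_words_freq docs_word_freq) := by unfold Pre_get_all_words_freq; infer_instance

def pvWitness_get_all_words_freq : (List (String × List (String × Int))) :=
  [("d1", [("a", 1), ("b", 2)]), ("d2", [("a", 3)])]

def Spec_get_all_words_freq (docs_word_freq : List (String × List (String × Int))) (out : List (String × Int)) : Prop := out = get_all_words_freq_alt docs_word_freq
instance (docs_word_freq : List (String × List (String × Int))) (out : List (String × Int)) : Decidable (Spec_get_all_words_freq docs_word_freq out) := by unfold Spec_get_all_words_freq; infer_instance

-- ===== CLAIM (what is proved, stated in full; the proofs are below) =====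
def Claim_equal_get_all_words_freq : Prop := ∀ (docs_word_freq : List (String × List (String × Int))), Dom_get_all_words_freq docs_word_freq → Pre_get_all_words_freq docs_word_freq → Spec_get_all_words_freq docs_word_freq (get_all_words_freq docs_word_freq)

-- ===== LEMMAS AND PROOFS =====

-- the canonical per-entry update step A performs, once the dict lookups are resolved
def pvStep (d : PySem.Dict String Int) (w : String × Int) : PySem.Dict String Int :=
  d.insert w.1 (d.getD w.1 0 + w.2)

-- total frequency of word w in a flat list of entries
def pvS (w : String) (ps : List (String × Int)) : Int :=
  (ps.map (fun q => if q.1 = w then q.2 else 0)).sum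

theorem pvS_nil (w : String) : pvS w [] = 0 := rfl

theorem pvS_cons (w : String) (p : String × Int) (ps : List (String × Int)) :
    pvS w (p :: ps) = (if p.1 = w then p.2 else 0) + pvS w ps := by
  simp [pvS]

theorem pvS_append (w : String) (l₁ l₂ : List (String × Int)) :
    pvS w (l₁ ++ l₂) = pvS w l₁ + pvS w l₂ := by
  simp [pvS]

theorem pvS_of_not_mem (w : String) (l : List (String × Int)) (h : w ∉ l.map Prod.fst) :
    pvS w l = 0 := by
  induction l with
  | nil => rfl
  | cons p ps ih =>
    simp only [List.map_cons, List.mem_cons, not_or] at h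
    rw [pvS_cons, if_neg (fun hh => h.1 hh.symm), ih h.2, add_zero]

-- nested fold over the documents = fold over the flattened entry list
theorem pvSumFlat (w : String) (docs : List (String × List (String × Int))) :
    (docs.map (fun d => pvS w d.2)).sum = pvS w (docs.flatMap (·.2)) := by
  induction docs with
  | nil => rfl
  | cons d ds ih => simp [pvS_append, ih]

theorem pvFlatFold {β : Type} (docs : List (String × List (String × Int)))
    (g : β → (String × Int) → β) (init : β) :
    docs.foldl (fun a d => d.2.foldl g a) init = (docs.flatMap (·.2)).foldl g init := by
  induction docs generalizing init with
  | nil => rfl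
  | cons d ds ih => simp [List.foldl_append, ih]

-- lookup in a duplicate-free literal dict is the total frequency of the key
theorem pvMkGetD (l : List (String × Int)) (w : String) (h : (l.map Prod.fst).Nodup) :
    (PySem.Dict.mk l).getD w 0 = pvS w l := by
  induction l with
  | nil => simp [pvS, PySem.Dict.getD_eq_get?_getD, PySem.Dict.get?]
  | cons p ps ih =>
    simp only [List.map_cons, List.nodup_cons] at h
    rw [PySem.Dict.getD_eq_get?_getD, PySem.Dict.get?_mk_cons, pvS_cons]
    by_cases hw : p.1 = w
    · subst hw
      rw [if_pos (by simp), if_pos rfl, Option.getD_some, pvS_of_not_mem _ _ h.1, add_zero]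
    · rw [if_neg (by simpa using hw), if_neg hw, ← PySem.Dict.getD_eq_get?_getD, ih h.2, zero_add]

-- the accumulation loop, characterised: keys in first-appearance order, values = totals
theorem pvCore (ps : List (String × Int)) :
    ∀ (d : PySem.Dict String Int), d.keys.Nodup →
      (ps.foldl pvStep d).items
        = (PySem.Set.update d.keys (ps.map Prod.fst)).map (fun w => (w, d.getD w 0 + pvS w ps)) := by
  induction ps with
  | nil =>
    intro d hd
    simp only [List.foldl_nil, List.map_nil, PySem.Set.update_nil, pvS_nil, add_zero]
    exact PySem.Dict.items_eq_map_keys d hd 0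
  | cons p ps ih =>
    intro d hd
    have hd' : (pvStep d p).keys.Nodup := PySem.Dict.nodup_keys_insert _ _ _ hd
    rw [List.foldl_cons, ih (pvStep d p) hd']
    have hkeys : (pvStep d p).keys = PySem.Set.add d.keys p.1 := by
      by_cases hc : d.contains p.1
      · rw [PySem.Set.add_of_mem ((PySem.Dict.contains_iff_mem_keys _ _).mp hc)]
        exact PySem.Dict.keys_insert_of_contains _ _ hc
      · have hm : p.1 ∉ d.keys := fun hm => hc ((PySem.Dict.contains_iff_mem_keys _ _).mpr hm)
        rw [PySem.Set.add_of_not_mem hm]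
        exact PySem.Dict.keys_insert_of_not_contains _ _ (eq_false_of_ne_true hc)
    rw [List.map_cons, PySem.Set.update_cons, ← hkeys]
    apply List.map_congr_left
    intro w _
    rw [pvS_cons]
    show (w, (pvStep d p).getD w 0 + pvS w ps) = _
    rw [pvStep, PySem.Dict.getD_insert]
    by_cases hw : w = p.1
    · rw [if_pos hw, if_pos hw.symm, hw]; ring_nf
    · rw [if_neg hw, if_neg (fun hh => hw hh.symm), zero_add]

-- ===== VERDICT (by name: the statement is the Claim_ definition above) =====
theorem get_all_words_freq_spec : Claim_equal_get_all_words_freq := by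
  intro docs hdom hpre
  obtain ⟨htop, hinner⟩ := hpre
  unfold Spec_get_all_words_freq get_all_words_freq get_all_words_freq_alt
  have hkeysmk : (PySem.Dict.mk docs).keys.Nodup := by simpa using htop
  have hget : ∀ doc ∈ docs, (PySem.Dict.mk docs).getD doc.1 [] = doc.2 := by
    intro doc hm
    exact PySem.Dict.getD_of_mem_items _ (by simpa using hm) hkeysmk []
  -- A side: resolve the dict lookups, flatten, apply the characterisation
  have hA : (docs.foldl
      (fun all_word_freq doc =>
        let doc_word_freq := (PySem.Dict.mk docs).getD doc.1 []
        doc_word_freq.foldl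
          (fun all_word_freq w =>
            let word_freq := all_word_freq.getD w.1 0 + (PySem.Dict.mk doc_word_freq).getD w.1 0
            all_word_freq.insert w.1 word_freq)
          all_word_freq)
      PySem.Dict.empty).items
      = (PySem.Set.ofList ((docs.flatMap (·.2)).map Prod.fst)).map
          (fun w => (w, pvS w (docs.flatMap (·.2)))) := by
    have h1 : docs.foldl
        (fun all_word_freq doc =>
          let doc_word_freq := (PySem.Dict.mk docs).getD doc.1 []
          doc_word_freq.foldl
            (fun all_word_freq w =>
              let word_freq := all_word_freq.getD w.1 0 + (PySem.Dict.mk doc_word_freq).getD w.1 0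
              all_word_freq.insert w.1 word_freq)
            all_word_freq)
        PySem.Dict.empty
        = docs.foldl (fun a doc => doc.2.foldl pvStep a) PySem.Dict.empty := by
      apply PySem.List.foldl_congr_mem
      intro acc doc hm
      rw [hget doc hm]
      apply PySem.List.foldl_congr_mem
      intro a w hw
      have : (PySem.Dict.mk doc.2).getD w.1 0 = w.2 :=
        PySem.Dict.getD_of_mem_items _ (by simpa using hw) (by simpa using hinner doc hm) 0
      simp only [this, pvStep]
    rw [h1, pvFlatFold, pvCore _ PySem.Dict.empty (by simp [PySem.Dict.keys_empty])]
    simp [PySem.Dict.keys_empty, PySem.Dict.getD_empty, PySem.Set.update_nil_left]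
  rw [hA]
  -- B side: resolve the lookups in the word collector and in the per-word sums
  have hwords : docs.foldl
      (fun ws doc =>
        ((PySem.Dict.mk docs).getD doc.1 []).foldl (fun ws w => PySem.Set.add ws w.1) ws) []
      = PySem.Set.ofList ((docs.flatMap (·.2)).map Prod.fst) := by
    have h1 : docs.foldl
        (fun ws doc =>
          ((PySem.Dict.mk docs).getD doc.1 []).foldl (fun ws w => PySem.Set.add ws w.1) ws) []
        = docs.foldl (fun ws doc => doc.2.foldl (fun ws w => PySem.Set.add ws w.1) ws) [] := by
      apply PySem.List.foldl_congr_mem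
      intro ws doc hm
      rw [hget doc hm]
    rw [h1, pvFlatFold, ← PySem.Set.update_map_eq_foldl_add, PySem.Set.update_nil_left]
  rw [hwords]
  apply List.map_congr_left
  intro w _
  have h2 : docs.foldl
      (fun acc doc =>
        acc + (PySem.Dict.mk ((PySem.Dict.mk docs).getD doc.1 [])).getD w 0) 0
      = docs.foldl (fun acc doc => acc + pvS w doc.2) 0 := by
    apply PySem.List.foldl_congr_mem
    intro acc doc hm
    rw [hget doc hm, pvMkGetD _ _ (hinner doc hm)]
  have h3 : docs.foldl (fun acc doc => acc + pvS w doc.2) 0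
      = pvS w (docs.flatMap (·.2)) := by
    rw [PySem.List.foldl_add, pvSumFlat, zero_add]
  rw [show (w, docs.foldl
      (fun acc doc =>
        acc + (PySem.Dict.mk ((PySem.Dict.mk docs).getD doc.1 [])).getD w 0) 0)
      = (w, pvS w (docs.flatMap (·.2))) by rw [h2, h3]]
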